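-- pv_equiv track=rewrite | github.com/giovannitarter/adventofcode | 2020/20/rearrange.py | check_monster
-- ===== SOURCE A (Python) =====
-- import copy
--
-- def check_monster(image, monster, x0, y0):
--
--     res = 0
--     res_img = copy.deepcopy(image)
--     for x, y in monster:
--
--         cy = y0 + y
--         cx = x0 + x
--
--         if cy < len(image) and cx < len(image[0]):
--             if image[cy][cx] == "#":
--                 res = res + 1
--
--                 tmp = list(res_img[cy])
--                 tmp.pop(cx)
--                 tmp.insert(cx, "O")
--                 tmp = "".join(tmp)
--                 res_img.pop(cy)
--                 res_img.insert(cy, tmp)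
--
--
--     if res == len(monster):
--         return (True, res_img)
--
--     return (False, None)
-- ===== SOURCE B (Python) =====
-- def check_monster(image, monster, x0, y0):
--     if not all(0 <= y0 + y < len(image) and 0 <= x0 + x < len(image[0])
--                and image[y0 + y][x0 + x] == "#"
--                for x, y in monster):
--         return (False, None)
--     marks = {(y0 + y, x0 + x) for x, y in monster}
--     return (True, ["".join("O" if (r, c) in marks else ch
--                            for c, ch in enumerate(row))
--                    for r, row in enumerate(image)])
-- ===== Notes on version B (the rewrite author's own statement) =====
-- stated objective: simpler
-- what changed: B decides the match with a single all(...) predicate over the monster offsets and, on success, rebuilds the whole image in one comprehension against a set of absolute monster coordinates, instead of A's counting loop that deep-copies the image and mutates it cell by cell with pop/insert.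
-- intended difference: On inputs where every monster cell matches '#' but only via Python negative-index wraparound (some y0+y or x0+x is negative), A returns (True, image) with 'O' marks placed at pop/insert-shifted positions (e.g. ['abc#'] with offset (-1) yields 'abOc'), while B returns (False, None), the intended value since the monster does not lie inside the image. — e.g. on check_monster(["#"], [(-1, -1)], 0, 0): A returns (true, some ["O"]), B returns (false, none)
import Mathlib
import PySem

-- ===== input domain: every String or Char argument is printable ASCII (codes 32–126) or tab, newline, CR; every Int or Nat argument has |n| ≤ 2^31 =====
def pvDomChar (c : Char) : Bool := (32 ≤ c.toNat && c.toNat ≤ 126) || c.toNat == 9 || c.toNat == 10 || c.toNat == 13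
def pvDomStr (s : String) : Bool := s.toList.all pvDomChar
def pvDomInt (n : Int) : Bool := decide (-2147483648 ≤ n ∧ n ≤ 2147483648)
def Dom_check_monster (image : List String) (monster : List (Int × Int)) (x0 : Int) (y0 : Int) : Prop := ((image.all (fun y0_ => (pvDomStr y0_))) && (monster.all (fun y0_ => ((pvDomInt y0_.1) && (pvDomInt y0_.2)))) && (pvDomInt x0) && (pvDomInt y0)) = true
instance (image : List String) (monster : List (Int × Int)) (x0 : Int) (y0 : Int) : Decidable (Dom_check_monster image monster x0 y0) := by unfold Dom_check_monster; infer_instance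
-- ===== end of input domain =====

-- B decides the match with one all(...) predicate over the monster offsets and rebuilds the
-- whole image in a single comprehension against a set of absolute monster coordinates,
-- instead of A's counting loop that mutates a deep copy cell by cell (objective: simpler);
-- on monsters that match only through Python negative-index wraparound B intentionally
-- returns (False, None) — see D_check_monster below.

-- ===== PORT A =====
def check_monster (image : List String) (monster : List (Int × Int)) (x0 : Int) (y0 : Int) : Bool × Option (List String) :=
  -- res = 0; res_img = deepcopy(image); for x, y in monster: …
  let st := monster.foldl (fun (st : Int × List String) p =>
    let cy := y0 + p.2
    let cx := x0 + p.1
    if cy < (image.length : Int) ∧ cx < PySem.Str.len ((PySem.List.pyGet? image 0).getD "") then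
      if ((PySem.List.pyGet? image cy).bind (fun r => PySem.Str.pyGet? r cx)) = some '#' then
        let res := st.1 + 1
        let tmp := ((PySem.List.pyGet? st.2 cy).getD "").toList        -- tmp = list(res_img[cy])
        let tmp := ((PySem.List.pop? tmp cx).map Prod.snd).getD tmp    -- tmp.pop(cx)
        let tmp := PySem.List.insert tmp cx 'O'                        -- tmp.insert(cx, "O")
        let tmpS := String.ofList tmp                                  -- tmp = "".join(tmp)
        let ri := ((PySem.List.pop? st.2 cy).map Prod.snd).getD st.2   -- res_img.pop(cy)
        (res, PySem.List.insert ri cy tmpS)                            -- res_img.insert(cy, tmp)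
      else st
    else st) (0, image)
  if st.1 = (monster.length : Int) then (true, some st.2) else (false, none)

-- ===== PORT B =====
-- "".join("O" if (r, c) in marks else ch for c, ch in enumerate(row))
def pvMarkRow (marks : PySem.Set (Int × Int)) (r : Int) (row : String) : String :=
  String.ofList ((PySem.List.enumerate row.toList).map
    (fun cp => if marks.contains (r, cp.1) then 'O' else cp.2))

-- [… for r, row in enumerate(image)]
def pvRebuild (marks : PySem.Set (Int × Int)) (image : List String) : List String :=
  (PySem.List.enumerate image).map (fun rp => pvMarkRow marks rp.1 rp.2)

def check_monster_alt (image : List String) (monster : List (Int × Int)) (x0 : Int) (y0 : Int) : Bool × Option (List String) :=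
  if monster.all (fun p =>
      decide (0 ≤ y0 + p.2) && decide (y0 + p.2 < (image.length : Int)) &&
      decide (0 ≤ x0 + p.1) && decide (x0 + p.1 < PySem.Str.len ((PySem.List.pyGet? image 0).getD "")) &&
      (((PySem.List.pyGet? image (y0 + p.2)).bind (fun r => PySem.Str.pyGet? r (x0 + p.1))) == some '#'))
  then (true, some (pvRebuild (PySem.Set.ofList (monster.map (fun p => (y0 + p.2, x0 + p.1)))) image))
  else (false, none)

-- ===== PRECONDITION & SPEC =====
-- Pre_ excludes exactly the inputs on which A raises: a monster cell whose row index passes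
-- 'cy < len(image)' on an empty image (so len(image[0]) raises IndexError), or whose cell read
-- image[cy][cx] raises IndexError (index beyond Python's wraparound range, or a ragged row
-- shorter than row 0).
def pvPreCell (image : List String) (x0 : Int) (y0 : Int) (p : Int × Int) : Bool :=
  if y0 + p.2 < (image.length : Int) then
    match PySem.List.pyGet? image 0 with
    | none => false
    | some r0 =>
      if x0 + p.1 < PySem.Str.len r0 then
        (((PySem.List.pyGet? image (y0 + p.2)).bind (fun r => PySem.Str.pyGet? r (x0 + p.1)))).isSome
      else true
  else true

def Pre_check_monster (image : List String) (monster : List (Int × Int)) (x0 : Int) (y0 : Int) : Prop :=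
  ∀ p ∈ monster, pvPreCell image x0 y0 p = true

instance (image : List String) (monster : List (Int × Int)) (x0 : Int) (y0 : Int) : Decidable (Pre_check_monster image monster x0 y0) := by unfold Pre_check_monster; infer_instance

def pvWitness_check_monster : List String × (List (Int × Int)) × Int × Int :=
  (["#.#", "###"], [(0, 0), (2, 0), (0, 1), (1, 1), (2, 1)], 0, 0)

-- On inputs where every monster cell matches '#' but only via Python negative-index wraparound
-- (some y0+y or x0+x negative), A returns (True, image) with 'O' marks at pop/insert-shifted
-- positions, while B returns (False, None) — the intended value, since such a monster does not
-- lie inside the image.  ('#' at the wrapped coordinate = membership in the indexed grid, the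
-- index taken either directly or shifted once by the corresponding length.)
def D_check_monster (image : List String) (monster : List (Int × Int)) (x0 : Int) (y0 : Int) : Prop :=
  (∀ p ∈ monster, x0 + p.1 < ((image.headD "").toList.length : Int) ∧
    ∃ pr ∈ image.zipIdx, ∃ pc ∈ pr.1.toList.zipIdx, pc.1 = '#' ∧
      (y0 + p.2 = pr.2 ∨ y0 + p.2 + image.length = pr.2) ∧
      (x0 + p.1 = pc.2 ∨ x0 + p.1 + pr.1.toList.length = pc.2)) ∧
  (∃ p ∈ monster, y0 + p.2 < 0 ∨ x0 + p.1 < 0)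

instance (image : List String) (monster : List (Int × Int)) (x0 : Int) (y0 : Int) : Decidable (D_check_monster image monster x0 y0) := by unfold D_check_monster; infer_instance

def Spec_check_monster (image : List String) (monster : List (Int × Int)) (x0 : Int) (y0 : Int) (out : Bool × Option (List String)) : Prop := ¬ D_check_monster image monster x0 y0 → out = check_monster_alt image monster x0 y0
instance (image : List String) (monster : List (Int × Int)) (x0 : Int) (y0 : Int) (out : Bool × Option (List String)) : Decidable (Spec_check_monster image monster x0 y0 out) := by unfold Spec_check_monster; infer_instance

def pvDiffWitness_check_monster : List String × (List (Int × Int)) × Int × Int :=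
  (["#"], [(-1, -1)], 0, 0)

def pvDiffWitnessOut_check_monster : (Bool × Option (List String)) × (Bool × Option (List String)) :=
  ((true, some ["O"]), (false, none))

-- ===== CLAIM (what is proved, stated in full; the proofs are below) =====
def Claim_unchanged_check_monster : Prop := ∀ (image : List String) (monster : List (Int × Int)) (x0 : Int) (y0 : Int), Dom_check_monster image monster x0 y0 → Pre_check_monster image monster x0 y0 → Spec_check_monster image monster x0 y0 (check_monster image monster x0 y0)
def Claim_changed_check_monster : Prop := Dom_check_monster (pvDiffWitness_check_monster.1) (pvDiffWitness_check_monster.2.1) (pvDiffWitness_check_monster.2.2.1) (pvDiffWitness_check_monster.2.2.2) ∧ Pre_check_monster (pvDiffWitness_check_monster.1) (pvDiffWitness_check_monster.2.1) (pvDiffWitness_check_monster.2.2.1) (pvDiffWitness_check_monster.2.2.2) ∧ D_check_monster (pvDiffWitness_check_monster.1) (pvDiffWitness_check_monster.2.1) (pvDiffWitness_check_monster.2.2.1) (pvDiffWitness_check_monster.2.2.2) ∧ check_monster (pvDiffWitness_check_monster.1) (pvDiffWitness_check_monster.2.1) (pvDiffWitness_check_monster.2.2.1) (pvDiffWitness_check_monster.2.2.2)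 = pvDiffWitnessOut_check_monster.1 ∧ check_monster_alt (pvDiffWitness_check_monster.1) (pvDiffWitness_check_monster.2.1) (pvDiffWitness_check_monster.2.2.1) (pvDiffWitness_check_monster.2.2.2) = pvDiffWitnessOut_check_monster.2 ∧ pvDiffWitnessOut_check_monster.1 ≠ pvDiffWitnessOut_check_monster.2
def Claim_exact_check_monster : Prop := ∀ (image : List String) (monster : List (Int × Int)) (x0 : Int) (y0 : Int), Dom_check_monster image monster x0 y0 → Pre_check_monster image monster x0 y0 → D_check_monster image monster x0 y0 → check_monster image monster x0 y0 ≠ check_monster_alt image monster x0 y0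

-- ===== LEMMAS AND PROOFS =====

-- A's per-cell match condition (Python negative indices wrap)
def pvCondA (image : List String) (x0 : Int) (y0 : Int) (p : Int × Int) : Bool :=
  decide (y0 + p.2 < (image.length : Int)) &&
  decide (x0 + p.1 < PySem.Str.len ((PySem.List.pyGet? image 0).getD "")) &&
  (((PySem.List.pyGet? image (y0 + p.2)).bind (fun r => PySem.Str.pyGet? r (x0 + p.1))) == some '#')

-- B's per-cell condition (no wraparound)
def pvCondB (image : List String) (x0 : Int) (y0 : Int) (p : Int × Int) : Bool :=
  decide (0 ≤ y0 + p.2) && decide (y0 + p.2 < (image.length : Int)) &&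
  decide (0 ≤ x0 + p.1) && decide (x0 + p.1 < PySem.Str.len ((PySem.List.pyGet? image 0).getD "")) &&
  (((PySem.List.pyGet? image (y0 + p.2)).bind (fun r => PySem.Str.pyGet? r (x0 + p.1))) == some '#')

theorem pvCondB_imp_condA (image : List String) (x0 y0 : Int) (p : Int × Int)
    (h : pvCondB image x0 y0 p = true) : pvCondA image x0 y0 p = true := by
  simp [pvCondB] at h
  simp [pvCondA]
  tauto

theorem pvCondA_nonneg_condB (image : List String) (x0 y0 : Int) (p : Int × Int)
    (h : pvCondA image x0 y0 p = true) (h1 : 0 ≤ y0 + p.2) (h2 : 0 ≤ x0 + p.1) :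
    pvCondB image x0 y0 p = true := by
  simp [pvCondA] at h
  simp [pvCondB]
  tauto

-- A's marking of one cell
def pvMark (x0 : Int) (y0 : Int) (m : List String) (p : Int × Int) : List String :=
  let cy := y0 + p.2
  let cx := x0 + p.1
  let tmp := ((PySem.List.pyGet? m cy).getD "").toList
  let tmp := ((PySem.List.pop? tmp cx).map Prod.snd).getD tmp
  let tmp := PySem.List.insert tmp cx 'O'
  let tmpS := String.ofList tmp
  let ri := ((PySem.List.pop? m cy).map Prod.snd).getD m
  PySem.List.insert ri cy tmpS

-- a cell whose coordinates index the image without wraparound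
def pvValid (image : List String) (x0 : Int) (y0 : Int) (p : Int × Int) : Prop :=
  ∃ row, PySem.List.pyGet? image (y0 + p.2) = some row ∧
    0 ≤ y0 + p.2 ∧ 0 ≤ x0 + p.1 ∧ x0 + p.1 < (row.toList.length : Int)

theorem pvCondA_iff (image : List String) (x0 y0 : Int) (p : Int × Int) :
    pvCondA image x0 y0 p = true ↔
      (y0 + p.2 < (image.length : Int) ∧ x0 + p.1 < PySem.Str.len ((PySem.List.pyGet? image 0).getD "")) ∧
      ((PySem.List.pyGet? image (y0 + p.2)).bind (fun r => PySem.Str.pyGet? r (x0 + p.1))) = some '#' := by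
  simp [pvCondA, and_assoc]

theorem pv_pyGet?_eq_some_iff {α : Type} (l : List α) (i : Int) (a : α) :
    PySem.List.pyGet? l i = some a ↔
      ∃ k : Nat, ∃ _ : k < l.length, l[k]? = some a ∧ (i = (k : Int) ∨ i + l.length = (k : Int)) := by
  constructor
  · intro h
    by_cases h0 : 0 ≤ i
    · rw [PySem.List.pyGet?_of_nonneg _ h0] at h
      obtain ⟨hlt, -⟩ := List.getElem?_eq_some_iff.mp h
      exact ⟨i.toNat, hlt, h, Or.inl (by omega)⟩
    · replace h0 : i < 0 := by omega
      have hin : PySem.Raise.InRange l.length i := by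
        by_contra hc
        rw [← PySem.List.pyGet?_eq_none_iff] at hc
        rw [hc] at h
        exact absurd h (by simp)
      obtain ⟨hge, -⟩ := hin
      have hik : i = -(((-i).toNat : Nat) : Int) := by omega
      rw [hik, PySem.List.pyGet?_neg_natCast l (-i).toNat (by omega) (by omega)] at h
      obtain ⟨hlt, -⟩ := List.getElem?_eq_some_iff.mp h
      exact ⟨l.length - (-i).toNat, hlt, h, Or.inr (by omega)⟩
  · rintro ⟨k, hk, he, hi | hi⟩
    · rw [hi, PySem.List.pyGet?_natCast]
      exact he
    · have hik : i = -(((l.length - k : Nat) : Nat) : Int) := by omega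
      rw [hik, PySem.List.pyGet?_neg_natCast l (l.length - k) (by omega) (by omega)]
      have hkk : l.length - (l.length - k) = k := by omega
      rw [hkk]
      exact he

theorem pvHit_iff (image : List String) (cy cx : Int) :
    (∃ pr ∈ image.zipIdx, ∃ pc ∈ pr.1.toList.zipIdx, pc.1 = '#' ∧
      (cy = pr.2 ∨ cy + image.length = pr.2) ∧
      (cx = pc.2 ∨ cx + pr.1.toList.length = pc.2)) ↔
      ((PySem.List.pyGet? image cy).bind (fun r => PySem.Str.pyGet? r cx)) = some '#' := by
  constructor
  · rintro ⟨pr, hpr, pc, hpc, hch, hy, hx⟩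
    rw [List.mem_zipIdx_iff_getElem?] at hpr hpc
    obtain ⟨hky, hre⟩ := List.getElem?_eq_some_iff.mp hpr
    obtain ⟨hkx, hce⟩ := List.getElem?_eq_some_iff.mp hpc
    have h1 : PySem.List.pyGet? image cy = some pr.1 :=
      (pv_pyGet?_eq_some_iff image cy _).mpr ⟨pr.2, hky, hpr, by omega⟩
    have h2 : PySem.List.pyGet? pr.1.toList cx = some '#' :=
      (pv_pyGet?_eq_some_iff _ cx '#').mpr ⟨pc.2, hkx, by rw [hpc, hch], by omega⟩
    rw [h1]
    simp only [Option.bind_some, PySem.Str.pyGet?, PySem.Chars.pyGet?_eq_listPyGet?]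
    exact h2
  · intro h
    cases hrow : PySem.List.pyGet? image cy with
    | none => rw [hrow] at h; exact absurd h (by simp)
    | some row =>
      rw [hrow] at h
      simp only [Option.bind_some, PySem.Str.pyGet?, PySem.Chars.pyGet?_eq_listPyGet?] at h
      obtain ⟨ky, hky, hre, hy⟩ := (pv_pyGet?_eq_some_iff image cy row).mp hrow
      obtain ⟨kx, hkx, hch, hx⟩ := (pv_pyGet?_eq_some_iff row.toList cx '#').mp h
      refine ⟨(row, ky), List.mem_zipIdx_iff_getElem?.mpr hre,
        ('#', kx), List.mem_zipIdx_iff_getElem?.mpr hch, rfl, by omega, by omega⟩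

theorem pv_width_eq (image : List String) :
    PySem.Str.len ((PySem.List.pyGet? image 0).getD "") = ((image.headD "").toList.length : Int) := by
  cases image with
  | nil => rw [(PySem.List.pyGet?_eq_none_iff ([] : List String) 0).mpr (by simp [PySem.Raise.InRange])]; simp [PySem.Str.len]
  | cons a t => rw [PySem.List.pyGet?_zero_cons]; simp [PySem.Str.len]

theorem pv_D_iff (image : List String) (monster : List (Int × Int)) (x0 y0 : Int) :
    D_check_monster image monster x0 y0 ↔
      ((∀ p ∈ monster, pvCondA image x0 y0 p = true) ∧
       (∃ p ∈ monster, y0 + p.2 < 0 ∨ x0 + p.1 < 0)) := by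
  unfold D_check_monster
  have hcell : ∀ p : Int × Int,
      (x0 + p.1 < ((image.headD "").toList.length : Int) ∧
        ∃ pr ∈ image.zipIdx, ∃ pc ∈ pr.1.toList.zipIdx, pc.1 = '#' ∧
          (y0 + p.2 = pr.2 ∨ y0 + p.2 + image.length = pr.2) ∧
          (x0 + p.1 = pc.2 ∨ x0 + p.1 + pr.1.toList.length = pc.2))
      ↔ pvCondA image x0 y0 p = true := by
    intro p
    rw [pvCondA_iff, pv_width_eq]
    constructor
    · rintro ⟨hw, hhit⟩
      have hbind := (pvHit_iff image (y0 + p.2) (x0 + p.1)).mp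
        (by refine ?_; exact hhit)
      have hcy : y0 + p.2 < (image.length : Int) := by
        cases hget : PySem.List.pyGet? image (y0 + p.2) with
        | none => rw [hget] at hbind; exact absurd hbind (by simp)
        | some row =>
          have := PySem.List.pyGet?_eq_none_iff image (y0 + p.2)
          by_contra hc
          have hnone : PySem.List.pyGet? image (y0 + p.2) = none :=
            this.mpr (fun hin => hc hin.2)
          exact absurd hnone (by simp [hget])
      exact ⟨⟨hcy, hw⟩, hbind⟩
    · rintro ⟨⟨hcy, hw⟩, hbind⟩
      exact ⟨hw, (pvHit_iff image (y0 + p.2) (x0 + p.1)).mpr hbind⟩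
  constructor
  · rintro ⟨h1, h2⟩
    exact ⟨fun p hp => (hcell p).mp (h1 p hp), h2⟩
  · rintro ⟨h1, h2⟩
    exact ⟨fun p hp => (hcell p).mpr (h1 p hp), h2⟩

theorem pv_fold_split (image : List String) (monster : List (Int × Int)) (x0 y0 : Int) :
    monster.foldl (fun (st : Int × List String) p =>
      let cy := y0 + p.2
      let cx := x0 + p.1
      if cy < (image.length : Int) ∧ cx < PySem.Str.len ((PySem.List.pyGet? image 0).getD "") then
        if ((PySem.List.pyGet? image cy).bind (fun r => PySem.Str.pyGet? r cx)) = some '#' then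
          let res := st.1 + 1
          let tmp := ((PySem.List.pyGet? st.2 cy).getD "").toList
          let tmp := ((PySem.List.pop? tmp cx).map Prod.snd).getD tmp
          let tmp := PySem.List.insert tmp cx 'O'
          let tmpS := String.ofList tmp
          let ri := ((PySem.List.pop? st.2 cy).map Prod.snd).getD st.2
          (res, PySem.List.insert ri cy tmpS)
        else st
      else st) (0, image)
    = ((monster.countP (pvCondA image x0 y0) : Int),
       monster.foldl (fun m p => if pvCondA image x0 y0 p then pvMark x0 y0 m p else m) image) := by
  have hstep : ∀ (st : Int × List String) (p : Int × Int),
      (fun (st : Int × List String) p =>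
        let cy := y0 + p.2
        let cx := x0 + p.1
        if cy < (image.length : Int) ∧ cx < PySem.Str.len ((PySem.List.pyGet? image 0).getD "") then
          if ((PySem.List.pyGet? image cy).bind (fun r => PySem.Str.pyGet? r cx)) = some '#' then
            let res := st.1 + 1
            let tmp := ((PySem.List.pyGet? st.2 cy).getD "").toList
            let tmp := ((PySem.List.pop? tmp cx).map Prod.snd).getD tmp
            let tmp := PySem.List.insert tmp cx 'O'
            let tmpS := String.ofList tmp
            let ri := ((PySem.List.pop? st.2 cy).map Prod.snd).getD st.2
            (res, PySem.List.insert ri cy tmpS)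
          else st
        else st) st p
      = ((fun (r : Int) p => if pvCondA image x0 y0 p then r + 1 else r) st.1 p,
         (fun m p => if pvCondA image x0 y0 p then pvMark x0 y0 m p else m) st.2 p) := by
    intro st p
    by_cases h1 : (y0 + p.2 < (image.length : Int) ∧ x0 + p.1 < PySem.Str.len ((PySem.List.pyGet? image 0).getD ""))
    · by_cases h2 : ((PySem.List.pyGet? image (y0 + p.2)).bind (fun r => PySem.Str.pyGet? r (x0 + p.1))) = some '#'
      · have hc : pvCondA image x0 y0 p = true := (pvCondA_iff image x0 y0 p).mpr ⟨h1, h2⟩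
        show (if _ ∧ _ then _ else _) = _
        rw [if_pos h1, if_pos h2]
        simp only [hc, if_true, pvMark]
      · have hc : ¬ pvCondA image x0 y0 p = true := fun h => h2 ((pvCondA_iff image x0 y0 p).mp h).2
        show (if _ ∧ _ then _ else _) = _
        rw [if_pos h1, if_neg h2]
        simp only [if_neg hc]
    · have hc : ¬ pvCondA image x0 y0 p = true := fun h => h1 ((pvCondA_iff image x0 y0 p).mp h).1
      show (if _ ∧ _ then _ else _) = _
      rw [if_neg h1]
      simp only [if_neg hc]
  rw [PySem.List.foldl_congr_mem _ _ _ _ (fun acc x _ => hstep acc x)]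
  rw [PySem.List.foldl_prod_mk (f := fun (r : Int) p => if pvCondA image x0 y0 p then r + 1 else r)
    (g := fun m p => if pvCondA image x0 y0 p then pvMark x0 y0 m p else m)]
  rw [PySem.List.foldl_if_add_one]
  simp

theorem pv_condA_nonneg_valid (image : List String) (x0 y0 : Int) (p : Int × Int)
    (hc : pvCondA image x0 y0 p = true) (h0y : 0 ≤ y0 + p.2) (h0x : 0 ≤ x0 + p.1) :
    pvValid image x0 y0 p := by
  obtain ⟨-, hbind⟩ := (pvCondA_iff image x0 y0 p).mp hc
  cases hrow : PySem.List.pyGet? image (y0 + p.2) with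
  | none => rw [hrow] at hbind; simp at hbind
  | some row =>
    rw [hrow] at hbind
    simp only [Option.bind_some] at hbind
    have hxlt : x0 + p.1 < (row.toList.length : Int) := by
      have hx : x0 + p.1 = ((x0 + p.1).toNat : Int) := (Int.toNat_of_nonneg h0x).symm
      rw [hx, PySem.Str.pyGet?_natCast] at hbind
      obtain ⟨hlt', -⟩ := List.getElem?_eq_some_iff.mp hbind
      omega
    exact ⟨row, hrow, h0y, h0x, hxlt⟩

theorem pv_popInsert_set {α : Type} (l : List α) (i : Int) (v : α)
    (h0 : 0 ≤ i) (h1 : i < (l.length : Int)) :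
    PySem.List.insert (((PySem.List.pop? l i).map Prod.snd).getD l) i v = l.set i.toNat v := by
  obtain ⟨n, rfl⟩ : ∃ n : Nat, i = (n : Int) := ⟨i.toNat, (Int.toNat_of_nonneg h0).symm⟩
  have hlt : n < l.length := by exact_mod_cast h1
  rw [PySem.List.pop?_natCast l n hlt]
  simp only [Option.map_some, Option.getD_some, Int.toNat_natCast]
  rw [PySem.List.insert_natCast _ n v (by rw [List.length_eraseIdx_of_lt hlt]; omega)]
  rw [List.eraseIdx_eq_take_drop_succ]
  have hlen : (List.take n l).length = n := by simp [List.length_take]; omega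
  rw [List.take_left' hlen, List.drop_left' hlen]
  rw [List.set_eq_take_append_cons_drop, if_pos hlt]

theorem pv_markRow_toList (S : PySem.Set (Int × Int)) (r : Int) (row : String) :
    (pvMarkRow S r row).toList =
      (PySem.List.enumerate row.toList).map (fun cp => if S.contains (r, cp.1) then 'O' else cp.2) := by
  simp [pvMarkRow]

theorem pv_markRow_length (S : PySem.Set (Int × Int)) (r : Int) (row : String) :
    (pvMarkRow S r row).toList.length = row.toList.length := by
  simp [pv_markRow_toList, PySem.List.length_enumerate]

theorem pv_markRow_getElem (S : PySem.Set (Int × Int)) (r : Int) (row : String)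
    (k : Nat) (hk : k < (pvMarkRow S r row).toList.length) :
    (pvMarkRow S r row).toList[k] =
      if S.contains (r, (k : Int)) then 'O' else row.toList[k]'(by
        have := pv_markRow_length S r row; omega) := by
  simp [pv_markRow_toList, PySem.List.getElem_enumerate]

theorem pv_rebuild_length (S : PySem.Set (Int × Int)) (image : List String) :
    (pvRebuild S image).length = image.length := by
  simp [pvRebuild, PySem.List.length_enumerate]

theorem pv_rebuild_getElem (S : PySem.Set (Int × Int)) (image : List String)
    (r : Nat) (hr : r < (pvRebuild S image).length) :
    (pvRebuild S image)[r] = pvMarkRow S (r : Int) (image[r]'(by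
      have := pv_rebuild_length S image; omega)) := by
  simp [pvRebuild, PySem.List.getElem_enumerate]

theorem pv_contains_add (S : PySem.Set (Int × Int)) (x y : Int × Int) :
    (S.add x).contains y = (S.contains y || y == x) := by
  by_cases h : y ∈ S.add x
  · rcases (PySem.Set.mem_add S x y).mp h with hs | he
    · rw [(PySem.Set.contains_iff _ _).mpr h, (PySem.Set.contains_iff _ _).mpr hs]
      simp
    · rw [(PySem.Set.contains_iff _ _).mpr h]
      simp [he]
  · have h1 : (S.add x).contains y = false := by
      rw [Bool.eq_false_iff]; intro hh; exact h ((PySem.Set.contains_iff _ _).mp hh)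
    have h2 : S.contains y = false := by
      rw [Bool.eq_false_iff]; intro hh
      exact h ((PySem.Set.mem_add S x y).mpr (Or.inl ((PySem.Set.contains_iff _ _).mp hh)))
    have h3 : (y == x) = false := by
      rw [Bool.eq_false_iff]; intro hh
      exact h ((PySem.Set.mem_add S x y).mpr (Or.inr (eq_of_beq hh)))
    rw [h1, h2, h3]; rfl

theorem pv_string_ext {s t : String} (h : s.toList = t.toList) : s = t := by
  have := congrArg String.ofList h
  simpa [String.ofList_toList] using this

theorem pv_markRow_congr (S T : PySem.Set (Int × Int)) (r : Int) (row : String)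
    (h : ∀ k : Nat, k < row.toList.length → S.contains (r, (k : Int)) = T.contains (r, (k : Int))) :
    pvMarkRow S r row = pvMarkRow T r row := by
  apply pv_string_ext
  apply List.ext_getElem (by rw [pv_markRow_length, pv_markRow_length])
  intro k hk1 hk2
  rw [pv_markRow_getElem, pv_markRow_getElem]
  rw [h k (by have := pv_markRow_length S r row; omega)]

theorem pv_rebuild_empty (image : List String) : pvRebuild PySem.Set.empty image = image := by
  apply List.ext_getElem (by rw [pv_rebuild_length])
  intro r h1 h2
  rw [pv_rebuild_getElem]
  apply pv_string_ext
  rw [pv_markRow_toList]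
  simp [PySem.List.map_snd_enumerate]

theorem pv_mark_rebuild (image : List String) (x0 y0 : Int) (S : PySem.Set (Int × Int))
    (p : Int × Int) (hv : pvValid image x0 y0 p) :
    pvMark x0 y0 (pvRebuild S image) p = pvRebuild (S.add (y0 + p.2, x0 + p.1)) image := by
  obtain ⟨row, hrow, h0y, h0x, hxlt⟩ := hv
  have hcast : (((y0 + p.2).toNat : Int)) = y0 + p.2 := Int.toNat_of_nonneg h0y
  have hxcast : (((x0 + p.1).toNat : Int)) = x0 + p.1 := Int.toNat_of_nonneg h0x
  rw [PySem.List.pyGet?_of_nonneg _ h0y] at hrow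
  obtain ⟨hcylt, hrowEq⟩ := List.getElem?_eq_some_iff.mp hrow
  have hlenR := pv_rebuild_length S image
  have hcyltR : (y0 + p.2) < ((pvRebuild S image).length : Int) := by rw [hlenR]; omega
  show PySem.List.insert ((Option.map Prod.snd (PySem.List.pop? (pvRebuild S image) (y0 + p.2))).getD (pvRebuild S image)) (y0 + p.2) (String.ofList (PySem.List.insert ((Option.map Prod.snd (PySem.List.pop? ((PySem.List.pyGet? (pvRebuild S image) (y0 + p.2)).getD "").toList (x0 + p.1))).getD ((PySem.List.pyGet? (pvRebuild S image) (y0 + p.2)).getD "").toList) (x0 + p.1) 'O')) = _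
  rw [PySem.List.pyGet?_eq_some_getElem _ h0y hcyltR]
  simp only [Option.getD_some]
  rw [pv_rebuild_getElem S image _ (by omega)]
  rw [pv_popInsert_set _ (x0 + p.1) 'O' h0x (by
    rw [pv_markRow_length, hrowEq]; exact hxlt)]
  rw [pv_popInsert_set _ (y0 + p.2) _ h0y hcyltR]
  apply List.ext_getElem (by rw [List.length_set, hlenR, pv_rebuild_length])
  intro r h1 h2
  rw [pv_rebuild_getElem _ image r (by rw [pv_rebuild_length]; rw [List.length_set, hlenR] at h1; exact h1)]
  by_cases hr : r = (y0 + p.2).toNat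
  · subst hr
    rw [List.getElem_set_self h1]
    apply pv_string_ext
    rw [String.toList_ofList]
    apply List.ext_getElem (by rw [List.length_set, pv_markRow_length, pv_markRow_length])
    intro k hk1 hk2
    rw [pv_markRow_getElem _ _ _ k hk2]
    by_cases hkc : k = (x0 + p.1).toNat
    · subst hkc
      rw [List.getElem_set_self hk1]
      have hc : ((S.add (y0 + p.2, x0 + p.1)).contains (((y0 + p.2).toNat : Int), (((x0 + p.1).toNat : Int))) ) = true := by
        rw [hcast, hxcast]
        exact (PySem.Set.contains_iff _ _).mpr ((PySem.Set.mem_add _ _ _).mpr (Or.inr rfl))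
      rw [hc]
      rfl
    · rw [List.getElem_set_ne (fun hh => hkc hh.symm) hk1]
      rw [pv_markRow_getElem _ _ _ k (by rw [List.length_set] at hk1; exact hk1)]
      have hc : (S.add (y0 + p.2, x0 + p.1)).contains (((y0 + p.2).toNat : Int), (k : Int))
          = S.contains (((y0 + p.2).toNat : Int), (k : Int)) := by
        rw [pv_contains_add]
        have hne : ((((y0 + p.2).toNat : Int), (k : Int)) == (y0 + p.2, x0 + p.1)) = false := by
          rw [beq_eq_false_iff_ne]
          intro hh
          apply hkc
          have := congrArg Prod.snd hh
          simp at this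
          omega
        rw [hne, Bool.or_false]
      rw [hc]
  · rw [List.getElem_set_ne (fun hh => hr hh.symm) h1]
    rw [pv_rebuild_getElem S image r (by rw [pv_rebuild_length]; rw [List.length_set, hlenR] at h1; exact h1)]
    apply pv_markRow_congr
    intro k hk
    rw [pv_contains_add]
    have hne : (((r : Int), (k : Int)) == (y0 + p.2, x0 + p.1)) = false := by
      rw [beq_eq_false_iff_ne]
      intro hh
      apply hr
      have := congrArg Prod.fst hh
      simp at this
      omega
    rw [hne, Bool.or_false]

theorem pv_fold_mark (image : List String) (x0 y0 : Int) (l : List (Int × Int))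
    (hv : ∀ p ∈ l, pvValid image x0 y0 p) (S : PySem.Set (Int × Int)) :
    l.foldl (fun m p => pvMark x0 y0 m p) (pvRebuild S image)
      = pvRebuild (l.foldl (fun s p => s.add (y0 + p.2, x0 + p.1)) S) image := by
  induction l generalizing S with
  | nil => rfl
  | cons a t ih =>
      simp only [List.foldl_cons]
      rw [pv_mark_rebuild image x0 y0 S a (hv a (by simp))]
      exact ih (fun p hp => hv p (by simp [hp])) _

-- ===== VERDICT (by name: the statements are the Claim_ definitions above) =====
theorem check_monster_spec : Claim_unchanged_check_monster := by
  intro image monster x0 y0 _hdom _hpre hD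
  show check_monster image monster x0 y0 = check_monster_alt image monster x0 y0
  have hsplit := pv_fold_split image monster x0 y0
  simp only [check_monster, check_monster_alt]
  rw [hsplit]
  have hcpred : (fun p : Int × Int =>
      decide (0 ≤ y0 + p.2) && decide (y0 + p.2 < (image.length : Int)) &&
      decide (0 ≤ x0 + p.1) && decide (x0 + p.1 < PySem.Str.len ((PySem.List.pyGet? image 0).getD "")) &&
      (((PySem.List.pyGet? image (y0 + p.2)).bind (fun r => PySem.Str.pyGet? r (x0 + p.1))) == some '#'))
      = pvCondB image x0 y0 := rfl
  rw [hcpred]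
  by_cases hallA : ∀ p ∈ monster, pvCondA image x0 y0 p = true
  · have hnonneg : ∀ p ∈ monster, 0 ≤ y0 + p.2 ∧ 0 ≤ x0 + p.1 := by
      intro p hp
      by_contra hneg
      exact hD ((pv_D_iff image monster x0 y0).mpr ⟨hallA, ⟨p, hp, by omega⟩⟩)
    have hallB : monster.all (pvCondB image x0 y0) = true := by
      rw [List.all_eq_true]
      intro p hp
      exact pvCondA_nonneg_condB image x0 y0 p (hallA p hp) (hnonneg p hp).1 (hnonneg p hp).2
    have hcount : monster.countP (pvCondA image x0 y0) = monster.length :=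
      List.countP_eq_length.mpr hallA
    rw [if_pos hallB, if_pos (by rw [hcount])]
    have hvalid : ∀ p ∈ monster, pvValid image x0 y0 p :=
      fun p hp => pv_condA_nonneg_valid image x0 y0 p (hallA p hp) (hnonneg p hp).1 (hnonneg p hp).2
    have hfold : monster.foldl (fun m p => if pvCondA image x0 y0 p then pvMark x0 y0 m p else m) image
        = monster.foldl (fun m p => pvMark x0 y0 m p) image :=
      PySem.List.foldl_congr_mem _ _ _ _ (fun acc x hx => by rw [if_pos (hallA x hx)])
    have hset : monster.foldl (fun s p => s.add (y0 + p.2, x0 + p.1)) PySem.Set.empty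
        = PySem.Set.ofList (monster.map (fun p => (y0 + p.2, x0 + p.1))) := by
      rw [← PySem.Set.update_map_eq_foldl_add monster (fun p => (y0 + p.2, x0 + p.1)) PySem.Set.empty]
      exact PySem.Set.update_nil_left _
    have hrw : monster.foldl (fun m p => pvMark x0 y0 m p) image
        = monster.foldl (fun m p => pvMark x0 y0 m p) (pvRebuild PySem.Set.empty image) := by
      rw [pv_rebuild_empty]
    rw [hfold, hrw, pv_fold_mark image x0 y0 monster hvalid PySem.Set.empty, hset]
  · have hallB : ¬ monster.all (pvCondB image x0 y0) = true := by
      intro hh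
      apply hallA
      intro p hp
      exact pvCondB_imp_condA image x0 y0 p ((List.all_eq_true.mp hh) p hp)
    rw [if_neg hallB, if_neg (by
      intro hh
      apply hallA
      have hh' : ((monster.countP (pvCondA image x0 y0) : Int)) = (monster.length : Int) := hh
      have hcount : monster.countP (pvCondA image x0 y0) = monster.length := by exact_mod_cast hh'
      exact List.countP_eq_length.mp hcount)]

theorem check_monster_changed : Claim_changed_check_monster := by
  unfold Claim_changed_check_monster; decide

theorem check_monster_tight : Claim_exact_check_monster := by
  intro image monster x0 y0 _hdom _hpre hD heq
  obtain ⟨hallA, p0, hp0, hneg⟩ := (pv_D_iff image monster x0 y0).mp hD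
  have hcount : monster.countP (pvCondA image x0 y0) = monster.length :=
    List.countP_eq_length.mpr hallA
  have hA : (check_monster image monster x0 y0).1 = true := by
    simp only [check_monster, pv_fold_split image monster x0 y0]
    rw [if_pos (by rw [hcount])]
  have hB : (check_monster_alt image monster x0 y0).1 = false := by
    simp only [check_monster_alt]
    have hallB : ¬ monster.all (fun p =>
        decide (0 ≤ y0 + p.2) && decide (y0 + p.2 < (image.length : Int)) &&
        decide (0 ≤ x0 + p.1) && decide (x0 + p.1 < PySem.Str.len ((PySem.List.pyGet? image 0).getD "")) &&
        (((PySem.List.pyGet? image (y0 + p.2)).bind (fun r => PySem.Str.pyGet? r (x0 + p.1))) == some '#')) = true := by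
      intro hh
      have := (List.all_eq_true.mp hh) p0 hp0
      simp only [Bool.and_eq_true, decide_eq_true_eq] at this
      omega
    rw [if_neg hallB]
  rw [heq, hB] at hA
  exact Bool.false_ne_true hA
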